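-- pv_equiv track=rewrite | github.com/BC-07/test | .history/app_20251022003214.py | _score_pds_experience
-- ===== SOURCE A (Python) =====
-- def _score_pds_experience(work_experience, job):
--     """Score work experience (max 30 points)."""
--     score = 0
--
--     # Years of experience (15 points max)
--     total_years = len(work_experience)  # Simplified calculation
--     experience_score = min(total_years * 2, 15)
--     score += experience_score
--
--     # Government service bonus (5 points)
--     govt_service = any(exp.get('govt_service') == 'Y' for exp in work_experience if exp.get('govt_service'))
--     if govt_service:
--         score += 5
--
--     # Position relevance (10 points max)
--     job_title = job.get('title', '').lower()
--     job_category = job.get('category', '').lower()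
--
--     relevance_score = 0
--     for exp in work_experience:
--         position = exp.get('position', '').lower()
--
--         # Check for direct position match
--         if any(keyword in position for keyword in job_title.split()):
--             relevance_score += 5
--             break
--
--         # Check for category match
--         if 'analyst' in position and 'analyst' in job_title:
--             relevance_score += 4
--         elif 'manager' in position and 'manager' in job_title:
--             relevance_score += 4
--         elif any(tech in position for tech in ['developer', 'programmer', 'it']) and 'technology' in job_category:
--             relevance_score += 3
--
--     score += min(relevance_score, 10)
--
--     return min(score, 30)
-- ===== SOURCE B (Python) =====
-- def _score_pds_experience(work_experience, job):
--     """Score work experience (max 30 points) — split-at-first-direct-match decomposition."""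
--     title = job.get('title', '').lower()
--     category = job.get('category', '').lower()
--     keywords = title.split()
--
--     def cat_points(pos):
--         if 'analyst' in pos and 'analyst' in title:
--             return 4
--         if 'manager' in pos and 'manager' in title:
--             return 4
--         if 'technology' in category and any(t in pos for t in ('developer', 'programmer', 'it')):
--             return 3
--         return 0
--
--     positions = [e.get('position', '').lower() for e in work_experience]
--     direct = [any(k in p for k in keywords) for p in positions]
--     if True in direct:
--         cut = direct.index(True)
--         relevance = 5 + sum(cat_points(p) for p in positions[:cut])
--     else:
--         relevance = sum(cat_points(p) for p in positions)
--
--     score = min(2 * len(work_experience), 15)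
--     if any(e.get('govt_service') == 'Y' for e in work_experience):
--         score += 5
--     return min(score + min(relevance, 10), 30)
-- ===== Notes on version B (the rewrite author's own statement) =====
-- stated objective: alternative
-- what changed: Replaces A's stateful break-loop with a data-flow decomposition: precompute lowered positions and a direct-match mask, split the list at the first direct match (list.index) and sum category points over the prefix; the redundant truthiness filter in the govt check is dropped.
import Mathlib
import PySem

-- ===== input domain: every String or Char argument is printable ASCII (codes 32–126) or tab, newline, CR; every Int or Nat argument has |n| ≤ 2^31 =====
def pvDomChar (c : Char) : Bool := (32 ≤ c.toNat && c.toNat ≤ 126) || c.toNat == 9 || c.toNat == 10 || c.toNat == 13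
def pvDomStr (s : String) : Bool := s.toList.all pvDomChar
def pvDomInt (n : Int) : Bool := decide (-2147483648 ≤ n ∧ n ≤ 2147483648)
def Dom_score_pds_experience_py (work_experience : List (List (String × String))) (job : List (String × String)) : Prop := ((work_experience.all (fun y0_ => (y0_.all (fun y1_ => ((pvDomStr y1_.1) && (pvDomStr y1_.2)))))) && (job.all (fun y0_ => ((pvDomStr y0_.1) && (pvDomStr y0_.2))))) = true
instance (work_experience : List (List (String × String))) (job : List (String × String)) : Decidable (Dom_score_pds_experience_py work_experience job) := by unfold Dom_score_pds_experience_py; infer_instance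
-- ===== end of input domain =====

-- B replaces A's stateful break-loop with a split-at-first-direct-match data-flow decomposition (alternative, same cost).


-- ===== PORT A =====
-- A's relevance loop: accumulator, stops (with +5) at the first direct job-title keyword match.
def pvRelLoopA (jt jc : String) (acc : Int) : List (List (String × String)) → Int
  | [] => acc
  | exp :: rest =>
    let position := PySem.Str.lower ((PySem.Dict.mk exp).getD "position" "")
    if (PySem.Str.split₀ jt).any (fun kw => PySem.Str.isIn kw position) then acc + 5
    else if PySem.Str.isIn "analyst" position && PySem.Str.isIn "analyst" jt then
      pvRelLoopA jt jc (acc + 4) rest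
    else if PySem.Str.isIn "manager" position && PySem.Str.isIn "manager" jt then
      pvRelLoopA jt jc (acc + 4) rest
    else if (["developer", "programmer", "it"].any (fun tech => PySem.Str.isIn tech position)) && PySem.Str.isIn "technology" jc then
      pvRelLoopA jt jc (acc + 3) rest
    else pvRelLoopA jt jc acc rest

def score_pds_experience_py (work_experience : List (List (String × String))) (job : List (String × String)) : Int :=
  let score : Int := 0
  let total_years : Int := (work_experience.length : Int)
  let experience_score : Int := min (total_years * 2) 15
  let score := score + experience_score
  let govt_service : Bool := work_experience.any (fun exp =>
    match (PySem.Dict.mk exp).get? "govt_service" with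
    | some s => (!(s == "")) && (s == "Y")
    | none => false)
  let score := if govt_service then score + 5 else score
  let job_title := PySem.Str.lower ((PySem.Dict.mk job).getD "title" "")
  let job_category := PySem.Str.lower ((PySem.Dict.mk job).getD "category" "")
  let relevance_score := pvRelLoopA job_title job_category 0 work_experience
  let score := score + min relevance_score 10
  min score 30

-- ===== PORT B =====
def pvCatPoints (title category pos : String) : Int :=
  if PySem.Str.isIn "analyst" pos && PySem.Str.isIn "analyst" title then 4
  else if PySem.Str.isIn "manager" pos && PySem.Str.isIn "manager" title then 4
  else if PySem.Str.isIn "technology" category && (["developer", "programmer", "it"].any (fun t => PySem.Str.isIn t pos)) then 3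
  else 0

def pvIsDirect (keywords : List String) (pos : String) : Bool :=
  keywords.any (fun k => PySem.Str.isIn k pos)

def score_pds_experience_py_alt (work_experience : List (List (String × String))) (job : List (String × String)) : Int :=
  let title := PySem.Str.lower ((PySem.Dict.mk job).getD "title" "")
  let category := PySem.Str.lower ((PySem.Dict.mk job).getD "category" "")
  let keywords := PySem.Str.split₀ title
  let positions := work_experience.map (fun e => PySem.Str.lower ((PySem.Dict.mk e).getD "position" ""))
  let direct := positions.map (pvIsDirect keywords)
  let relevance : Int :=
    match PySem.List.index? direct true with
    | some cut => 5 + ((positions.take cut).map (pvCatPoints title category)).sum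
    | none => ((positions.map (pvCatPoints title category)).sum)
  let score : Int := min (2 * (work_experience.length : Int)) 15
  let score := if work_experience.any (fun e => (PySem.Dict.mk e).get? "govt_service" == some "Y") then score + 5 else score
  min (score + min relevance 10) 30

-- ===== PRECONDITION & SPEC =====
def Spec_score_pds_experience_py (work_experience : List (List (String × String))) (job : List (String × String)) (out : Int) : Prop := out = score_pds_experience_py_alt work_experience job
instance (work_experience : List (List (String × String))) (job : List (String × String)) (out : Int) : Decidable (Spec_score_pds_experience_py work_experience job out) := by unfold Spec_score_pds_experience_py; infer_instance

-- ===== CLAIM (what is proved, stated in full; the proofs are below) =====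
def Claim_equal_score_pds_experience_py : Prop := ∀ (work_experience : List (List (String × String))) (job : List (String × String)), Dom_score_pds_experience_py work_experience job → Spec_score_pds_experience_py work_experience job (score_pds_experience_py work_experience job)

-- ===== LEMMAS AND PROOFS =====

-- B's relevance value for a list of (already lowered) positions.
def pvRelB (title category : String) (positions : List String) : Int :=
  match PySem.List.index? (positions.map (pvIsDirect (PySem.Str.split₀ title))) true with
  | some cut => 5 + ((positions.take cut).map (pvCatPoints title category)).sum
  | none => ((positions.map (pvCatPoints title category)).sum)

lemma pvRel_eq (jt jc : String) :
    ∀ (we : List (List (String × String))) (acc : Int),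
      pvRelLoopA jt jc acc we
        = acc + pvRelB jt jc (we.map (fun e => PySem.Str.lower ((PySem.Dict.mk e).getD "position" ""))) := by
  intro we
  induction we with
  | nil => intro acc; simp [pvRelLoopA, pvRelB, PySem.List.index?]
  | cons e rest ih =>
    intro acc
    by_cases hd : pvIsDirect (PySem.Str.split₀ jt) (PySem.Str.lower ((PySem.Dict.mk e).getD "position" "")) = true
    · have hA : ((PySem.Str.split₀ jt).any fun kw => PySem.Str.isIn kw (PySem.Str.lower ((PySem.Dict.mk e).getD "position" ""))) = true := by
        simpa [pvIsDirect] using hd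
      simp only [pvRelLoopA, pvRelB, List.map_cons, hA, if_true]
      rw [hd, PySem.List.index?_cons_self]
      simp
    · have hd' : pvIsDirect (PySem.Str.split₀ jt) (PySem.Str.lower ((PySem.Dict.mk e).getD "position" "")) = false := by
        simpa using hd
      have hA : ((PySem.Str.split₀ jt).any fun kw => PySem.Str.isIn kw (PySem.Str.lower ((PySem.Dict.mk e).getD "position" ""))) = false := by
        simpa [pvIsDirect] using hd'
      have hcat : pvRelLoopA jt jc acc (e :: rest)
          = pvRelLoopA jt jc (acc + pvCatPoints jt jc (PySem.Str.lower ((PySem.Dict.mk e).getD "position" ""))) rest := by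
        simp only [pvRelLoopA, hA, Bool.false_eq_true, if_false]
        simp only [pvCatPoints, Bool.and_comm]
        split_ifs <;> simp_all
      rw [hcat, ih]
      simp only [pvRelB, List.map_cons]
      rw [hd', PySem.List.index?_cons_of_ne _ Bool.false_ne_true]
      cases h : PySem.List.index? ((rest.map (fun e => PySem.Str.lower ((PySem.Dict.mk e).getD "position" ""))).map (pvIsDirect (PySem.Str.split₀ jt))) true with
      | none => simp; ring
      | some k => simp [List.take_succ_cons]; ring

lemma pvGovt_eq (we : List (List (String × String))) :
    (we.any (fun exp =>
      match (PySem.Dict.mk exp).get? "govt_service" with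
      | some s => (!(s == "")) && (s == "Y")
      | none => false))
      = we.any (fun e => (PySem.Dict.mk e).get? "govt_service" == some "Y") := by
  apply PySem.List.any_congr_mem
  intro e _
  cases hg : (PySem.Dict.mk e).get? "govt_service" with
  | none => simp
  | some s =>
    by_cases h : s = "Y"
    · subst h; simp
    · simp [h]

-- ===== VERDICT (by name: the statement is the Claim_ definition above) =====
theorem score_pds_experience_py_spec : Claim_equal_score_pds_experience_py := by
  intro we job _
  show _ = _
  unfold score_pds_experience_py score_pds_experience_py_alt
  simp only [pvGovt_eq, pvRel_eq, pvRelB, zero_add, mul_comm]
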